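-- pv_equiv track=rewrite | github.com/ArmedGuy/pyircd | irc/modes.py | parse
-- ===== SOURCE A (Python) =====
-- def parse(raw):
--     add = True
--     addlist = []
--     removelist = []
--     for c in raw:
--         if c == "+":
--             add = True
--             continue
--         if c == "-":
--             add = False
--             continue
--         if add == True:
--             addlist.append(c)
--         else:
--             removelist.append(c)
--     return (addlist, removelist)
-- ===== SOURCE B (Python) =====
-- def parse(raw):
--     addlist = []
--     removelist = []
--     for seg in raw.replace("-", "+-").split("+"):
--         if seg.startswith("-"):
--             removelist.extend(seg[1:])
--         else:
--             addlist.extend(seg)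
--     return (addlist, removelist)
-- ===== Notes on version B (the rewrite author's own statement) =====
-- stated objective: faster
-- what changed: Replaces the per-character sign-toggle loop with tokenization: every minus sign is first rewritten as a plus-then-minus pair, the string is split on plus signs, and each resulting segment (a leading minus marks a remove-segment) is bulk-extended onto the add or remove list via C-level str.replace/str.split/list.extend.
import Mathlib
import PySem

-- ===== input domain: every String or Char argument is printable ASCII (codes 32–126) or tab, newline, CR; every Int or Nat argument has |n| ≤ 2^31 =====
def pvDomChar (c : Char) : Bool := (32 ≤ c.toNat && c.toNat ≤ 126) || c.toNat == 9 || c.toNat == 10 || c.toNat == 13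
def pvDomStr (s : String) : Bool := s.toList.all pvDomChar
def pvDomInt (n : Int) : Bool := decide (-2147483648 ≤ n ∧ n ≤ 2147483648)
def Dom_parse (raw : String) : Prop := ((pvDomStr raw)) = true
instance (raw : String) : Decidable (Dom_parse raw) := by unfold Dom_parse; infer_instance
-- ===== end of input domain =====

-- B replaces A's per-character sign-toggle loop with string surgery:
-- raw.replace("-","+-").split("+") tokenizes into segments (a leading '-' marks a
-- remove-segment) which are bulk-extended onto the two lists (measured faster at large n).

-- ===== PORT A =====
def parseLoop : List Char → Bool → List String → List String → List String × List String
  | [], _, addlist, removelist => (addlist, removelist)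
  | c :: rest, add, addlist, removelist =>
    if c = '+' then parseLoop rest true addlist removelist
    else if c = '-' then parseLoop rest false addlist removelist
    else if add then parseLoop rest add (addlist ++ [String.ofList [c]]) removelist
    else parseLoop rest add addlist (removelist ++ [String.ofList [c]])

def parse (raw : String) : List String × List String :=
  parseLoop raw.toList true [] []

-- ===== PORT B =====
-- extend(list, seg): each char of the segment appended as a 1-char string
def strsOf (seg : List Char) : List String := seg.map (fun c => String.ofList [c])

def parseAltLoop : List (List Char) → List String → List String → List String × List String
  | [], addlist, removelist => (addlist, removelist)
  | seg :: rest, addlist, removelist =>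
    if PySem.Chars.startswith seg ['-'] then
      -- seg[1:]
      parseAltLoop rest addlist (removelist ++ strsOf (PySem.List.slice seg (some 1) none))
    else
      parseAltLoop rest (addlist ++ strsOf seg) removelist

def parse_alt (raw : String) : List String × List String :=
  let segs := PySem.Chars.splitOn (PySem.Str.replace raw "-" "+-").toList ['+']
  parseAltLoop segs [] []

-- ===== PRECONDITION & SPEC =====
def Spec_parse (raw : String) (out : List String × List String) : Prop := out = parse_alt raw
instance (raw : String) (out : List String × List String) : Decidable (Spec_parse raw out) := by unfold Spec_parse; infer_instance

-- ===== CLAIM (what is proved, stated in full; the proofs are below) =====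
def Claim_equal_parse : Prop := ∀ (raw : String), Dom_parse raw → Spec_parse raw (parse raw)

-- ===== LEMMAS AND PROOFS =====

-- structural model of replace(l, "-", "+-")
def repl : List Char → List Char
  | [] => []
  | c :: t => if c = '-' then '+' :: '-' :: repl t else c :: repl t

-- structural model of split("+") as (first segment, remaining segments)
def splitPF : List Char → List Char × List (List Char)
  | [] => ([], [])
  | c :: t =>
    if c = '+' then ([], (splitPF t).1 :: (splitPF t).2)
    else (c :: (splitPF t).1, (splitPF t).2)

-- segments of repl l, directly by recursion on l
def segsF : List Char → List Char × List (List Char)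
  | [] => ([], [])
  | c :: t =>
    if c = '+' then ([], (segsF t).1 :: (segsF t).2)
    else if c = '-' then ([], ('-' :: (segsF t).1) :: (segsF t).2)
    else (c :: (segsF t).1, (segsF t).2)

theorem segsF_plus (t : List Char) : segsF ('+' :: t) = ([], (segsF t).1 :: (segsF t).2) := by
  simp [segsF]

theorem segsF_minus (t : List Char) : segsF ('-' :: t) = ([], ('-' :: (segsF t).1) :: (segsF t).2) := by
  simp [segsF]

theorem replace_go_eq (l : List Char) : ∀ (fuel : Nat) (acc : List Char), l.length ≤ fuel →
    PySem.Chars.replace.go ['-'] ['+', '-'] fuel l acc = acc.reverse ++ repl l := by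
  induction l with
  | nil => intro fuel acc _; cases fuel <;> simp [PySem.Chars.replace.go, repl]
  | cons c t ih =>
    intro fuel acc h
    cases fuel with
    | zero => simp at h
    | succ f =>
      simp only [List.length_cons, Nat.succ_le_succ_iff] at h
      by_cases hc : c = '-'
      · subst hc
        rw [show PySem.Chars.replace.go ['-'] ['+','-'] (f+1) ('-'::t) acc
              = PySem.Chars.replace.go ['-'] ['+','-'] f t (['-','+'] ++ acc) by
            simp [PySem.Chars.replace.go, List.isPrefixOf]]
        rw [ih f _ h]; simp [repl]
      · rw [show PySem.Chars.replace.go ['-'] ['+','-'] (f+1) (c::t) acc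
              = PySem.Chars.replace.go ['-'] ['+','-'] f t (c :: acc) by
            simp only [PySem.Chars.replace.go, List.isPrefixOf]
            simp
            intro h; exact absurd h.symm hc]
        rw [ih f _ h]; simp [repl, hc]

theorem replace_eq (l : List Char) :
    PySem.Chars.replace l ['-'] ['+', '-'] = repl l := by
  have := replace_go_eq l l.length [] (le_refl _)
  simpa [PySem.Chars.replace] using this

theorem splitOn_go_eq (l : List Char) : ∀ (fuel : Nat) (cur : List Char) (acc : List (List Char)),
    l.length ≤ fuel →
    PySem.Chars.splitOn.go ['+'] fuel l cur acc
      = acc.reverse ++ (cur.reverse ++ (splitPF l).1) :: (splitPF l).2 := by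
  induction l with
  | nil => intro fuel cur acc _; cases fuel <;> simp [PySem.Chars.splitOn.go, splitPF]
  | cons c t ih =>
    intro fuel cur acc h
    cases fuel with
    | zero => simp at h
    | succ f =>
      simp only [List.length_cons, Nat.succ_le_succ_iff] at h
      by_cases hc : c = '+'
      · subst hc
        rw [show PySem.Chars.splitOn.go ['+'] (f+1) ('+'::t) cur acc
              = PySem.Chars.splitOn.go ['+'] f t [] (cur.reverse :: acc) by
            simp [PySem.Chars.splitOn.go, List.isPrefixOf]]
        rw [ih f _ _ h]; simp [splitPF]
      · rw [show PySem.Chars.splitOn.go ['+'] (f+1) (c::t) cur acc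
              = PySem.Chars.splitOn.go ['+'] f t (c :: cur) acc by
            simp only [PySem.Chars.splitOn.go, List.isPrefixOf]
            simp
            intro h; exact absurd h.symm hc]
        rw [ih f _ _ h]; simp [splitPF, hc]

theorem splitOn_eq (l : List Char) :
    PySem.Chars.splitOn l ['+'] = (splitPF l).1 :: (splitPF l).2 := by
  have := splitOn_go_eq l (l.length + 1) [] [] (by omega)
  simpa [PySem.Chars.splitOn] using this

theorem splitPF_repl (l : List Char) : splitPF (repl l) = segsF l := by
  induction l with
  | nil => simp [repl, splitPF, segsF]
  | cons c t ih =>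
    by_cases hp : c = '+'
    · simp [repl, splitPF, segsF, hp, ih]
    · by_cases hm : c = '-'
      · simp [repl, splitPF, segsF, hm, ih]
      · simp [repl, splitPF, segsF, hp, hm, ih]

theorem segsF_fst_no_dash (l : List Char) : '-' ∉ (segsF l).1 := by
  induction l with
  | nil => simp [segsF]
  | cons c t ih =>
    by_cases hp : c = '+'
    · simp [segsF, hp]
    · by_cases hm : c = '-'
      · simp [segsF, hm]
      · simp only [segsF, if_neg hp, if_neg hm, List.mem_cons, not_or]
        exact ⟨fun h => hm h.symm, ih⟩

theorem startswith_dash_false {seg : List Char} (h : '-' ∉ seg) :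
    PySem.Chars.startswith seg ['-'] = false := by
  cases seg with
  | nil => simp [PySem.Chars.startswith, List.isPrefixOf]
  | cons x xs =>
    simp only [List.mem_cons, not_or] at h
    simp only [PySem.Chars.startswith, List.isPrefixOf, Bool.and_eq_false_iff, beq_eq_false_iff_ne,
      List.isPrefixOf]
    exact Or.inl h.1

theorem altLoop_front {h : List Char} (rest : List (List Char))
    (addlist removelist : List String) (hnd : '-' ∉ h) :
    parseAltLoop (h :: rest) addlist removelist
      = parseAltLoop rest (addlist ++ strsOf h) removelist := by
  simp [parseAltLoop, startswith_dash_false hnd]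

theorem altLoop_front_dash {h : List Char} (rest : List (List Char))
    (addlist removelist : List String) :
    parseAltLoop (('-' :: h) :: rest) addlist removelist
      = parseAltLoop rest addlist (removelist ++ strsOf h) := by
  simp [parseAltLoop, PySem.Chars.startswith, List.isPrefixOf,
    PySem.List.slice_from_one]

theorem main_loop (l : List Char) : ∀ (addlist removelist : List String),
    (parseLoop l true addlist removelist
        = parseAltLoop ((segsF l).1 :: (segsF l).2) addlist removelist)
    ∧ (parseLoop l false addlist removelist
        = parseAltLoop (('-' :: (segsF l).1) :: (segsF l).2) addlist removelist) := by
  induction l with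
  | nil =>
    intro al rl
    constructor
    · rw [show segsF [] = ([], []) from rfl, altLoop_front ([]) al rl (by simp)]
      simp [parseLoop, parseAltLoop, strsOf]
    · rw [show segsF [] = ([], []) from rfl, altLoop_front_dash ([]) al rl]
      simp [parseLoop, parseAltLoop, strsOf]
  | cons c t ih =>
    intro al rl
    by_cases hp : c = '+'
    · subst hp
      constructor
      · rw [show parseLoop ('+'::t) true al rl = parseLoop t true al rl by simp [parseLoop]]
        rw [segsF_plus, altLoop_front ((segsF t).1 :: (segsF t).2) al rl (by simp),
          show strsOf [] = [] from rfl, List.append_nil]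
        exact (ih al rl).1
      · rw [show parseLoop ('+'::t) false al rl = parseLoop t true al rl by simp [parseLoop]]
        rw [segsF_plus, altLoop_front_dash ((segsF t).1 :: (segsF t).2) al rl,
          show strsOf [] = [] from rfl, List.append_nil]
        exact (ih al rl).1
    · by_cases hm : c = '-'
      · subst hm
        constructor
        · rw [show parseLoop ('-'::t) true al rl = parseLoop t false al rl by simp [parseLoop]]
          rw [segsF_minus, altLoop_front (('-' :: (segsF t).1) :: (segsF t).2) al rl (by simp),
            show strsOf [] = [] from rfl, List.append_nil]
          exact (ih al rl).2
        · rw [show parseLoop ('-'::t) false al rl = parseLoop t false al rl by simp [parseLoop]]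
          rw [segsF_minus, altLoop_front_dash (('-' :: (segsF t).1) :: (segsF t).2) al rl,
            show strsOf [] = [] from rfl, List.append_nil]
          exact (ih al rl).2
      · have hseg : segsF (c :: t) = (c :: (segsF t).1, (segsF t).2) := by
          simp [segsF, hp, hm]
        constructor
        · rw [show parseLoop (c::t) true al rl
                = parseLoop t true (al ++ [String.ofList [c]]) rl by
              simp [parseLoop, hp, hm]]
          rw [hseg, altLoop_front (segsF t).2 al rl
              (by simp only [List.mem_cons, not_or]; exact ⟨fun h => hm h.symm, segsF_fst_no_dash t⟩)]
          rw [(ih (al ++ [String.ofList [c]]) rl).1,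
            altLoop_front (segsF t).2 _ rl (segsF_fst_no_dash t)]
          simp [strsOf]
        · rw [show parseLoop (c::t) false al rl
                = parseLoop t false al (rl ++ [String.ofList [c]]) by
              simp [parseLoop, hp, hm]]
          rw [hseg, altLoop_front_dash (segsF t).2 al rl,
            (ih al (rl ++ [String.ofList [c]])).2,
            altLoop_front_dash (segsF t).2 al _]
          simp [strsOf]

-- ===== VERDICT (by name: the statement is the Claim_ definition above) =====
theorem parse_spec : Claim_equal_parse := by
  intro raw _
  unfold Spec_parse parse parse_alt
  rw [show (PySem.Str.replace raw "-" "+-").toList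
        = PySem.Chars.replace raw.toList ['-'] ['+','-'] by
      simp [PySem.Str.replace]]
  rw [replace_eq, splitOn_eq, splitPF_repl]
  exact (main_loop raw.toList [] []).1
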